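-- pv_equiv track=rewrite | github.com/xvedesh/ai-kafka-validator | agent/main.py | is_formatting_request
-- ===== SOURCE A (Python) =====
-- def is_formatting_request(text: str) -> bool:
--     lowered = text.lower()
--     patterns = [
--         "pretty view",
--         "line by line",
--         "new line",
--         "each command",
--         "just commands",
--         "command only",
--         "only commands",
--         "format that",
--         "reformat",
--         "shorter",
--     ]
--     return any(pattern in lowered for pattern in patterns)
-- ===== SOURCE B (Python) =====
-- _PATTERNS = [
--     "pretty view",
--     "line by line",
--     "new line",
--     "each command",
--     "just commands",
--     "command only",
--     "only commands",
--     "format that",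
--     "reformat",
--     "shorter",
-- ]
--
--
-- def is_formatting_request(text: str) -> bool:
--     # Single left-to-right scan over positions; at each position test whether
--     # any phrase starts there, instead of one full substring scan per phrase.
--     lowered = text.lower()
--     for i in range(len(lowered)):
--         if any(lowered.startswith(p, i) for p in _PATTERNS):
--             return True
--     return False
-- ===== Notes on version B (the rewrite author's own statement) =====
-- stated objective: alternative
-- what changed: A runs one independent full substring search over the text per phrase; B makes a single positional scan over the lowered text, testing at each index whether any phrase starts there via an offset prefix test, so the text is traversed once.
import Mathlib
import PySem

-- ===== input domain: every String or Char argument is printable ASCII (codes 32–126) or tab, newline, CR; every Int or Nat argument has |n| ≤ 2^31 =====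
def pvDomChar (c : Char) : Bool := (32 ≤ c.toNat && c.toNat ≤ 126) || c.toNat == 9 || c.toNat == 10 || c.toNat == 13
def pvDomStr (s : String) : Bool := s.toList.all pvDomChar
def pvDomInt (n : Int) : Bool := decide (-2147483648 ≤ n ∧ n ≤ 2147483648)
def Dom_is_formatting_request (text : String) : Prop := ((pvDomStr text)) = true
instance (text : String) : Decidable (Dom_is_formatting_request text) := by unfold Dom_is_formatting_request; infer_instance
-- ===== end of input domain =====

-- B: one positional scan testing each phrase with an offset startswith, instead of one substring search per phrase (objective: alternative).
-- ===== PORT A =====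
def is_formatting_request (text : String) : Bool :=
  let lowered := PySem.Str.lower text
  let patterns : List String :=
    ["pretty view", "line by line", "new line", "each command", "just commands",
     "command only", "only commands", "format that", "reformat", "shorter"]
  patterns.any (fun pattern => PySem.Str.isIn pattern lowered)

-- ===== PORT B =====
def pvAltPatterns : List String :=
  ["pretty view", "line by line", "new line", "each command", "just commands",
   "command only", "only commands", "format that", "reformat", "shorter"]

def is_formatting_request_alt (text : String) : Bool :=
  let lowered := (PySem.Str.lower text).toList
  (List.range lowered.length).any (fun i =>
    pvAltPatterns.any (fun p => p.toList.isPrefixOf (lowered.drop i)))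

-- ===== PRECONDITION & SPEC =====
def Spec_is_formatting_request (text : String) (out : Bool) : Prop := out = is_formatting_request_alt text
instance (text : String) (out : Bool) : Decidable (Spec_is_formatting_request text out) := by unfold Spec_is_formatting_request; infer_instance

-- ===== CLAIM (what is proved, stated in full; the proofs are below) =====
def Claim_equal_is_formatting_request : Prop := ∀ (text : String), Dom_is_formatting_request text → Spec_is_formatting_request text (is_formatting_request text)

-- ===== LEMMAS AND PROOFS =====

-- ===== VERDICT (by name: the statement is the Claim_ definition above) =====
lemma pv_exists_prefix_drop_bounded {p s : List Char} (hp : p ≠ []) :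
    (∃ j, p <+: s.drop j) ↔ ∃ j < s.length, p <+: s.drop j := by
  constructor
  · rintro ⟨j, hj⟩
    by_cases h : j < s.length
    · exact ⟨j, h, hj⟩
    · rw [List.drop_eq_nil_of_le (by omega)] at hj
      exact absurd (List.prefix_nil.mp hj) hp
  · rintro ⟨j, _, hj⟩; exact ⟨j, hj⟩

theorem is_formatting_request_spec : Claim_equal_is_formatting_request := by
  intro text _
  show is_formatting_request text = is_formatting_request_alt text
  apply Bool.eq_iff_iff.mpr
  simp only [is_formatting_request, is_formatting_request_alt, List.any_eq_true,
    List.mem_range, PySem.Str.isIn_iff_infix, List.isPrefixOf_iff_prefix]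
  constructor
  · rintro ⟨p, hp, hinf⟩
    have hne : p.toList ≠ [] := by
      fin_cases hp <;> decide
    have : ∃ j, p.toList <+: (PySem.Str.lower text).toList.drop j :=
      (PySem.Chars.exists_prefix_drop_iff_isIn _ _).mpr ((PySem.Chars.isIn_iff_infix _ _).mpr hinf)
    obtain ⟨j, hj, hpre⟩ := (pv_exists_prefix_drop_bounded hne).mp this
    exact ⟨j, hj, p, hp, hpre⟩
  · rintro ⟨j, _, p, hp, hpre⟩
    exact ⟨p, hp, (PySem.Chars.isIn_iff_infix _ _).mp
      ((PySem.Chars.exists_prefix_drop_iff_isIn _ _).mp ⟨j, hpre⟩)⟩
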